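-- pv_equiv track=rewrite | github.com/lihan0705/kimi-cli-plus | packages/kosong/src/kosong/contrib/chat_provider/openai_responses.py | _strip_stray_empty_containers
-- ===== SOURCE A (Python) =====
-- def _strip_stray_empty_containers(raw: str) -> str:
--     chars: list[str] = []
--     i = 0
--     in_string = False
--     escaped = False
--     while i < len(raw):
--         char = raw[i]
--         if in_string:
--             chars.append(char)
--             if escaped:
--                 escaped = False
--             elif char == "\\":
--                 escaped = True
--             elif char == '"':
--                 in_string = False
--             i += 1
--             continue
--
--         if char == '"':
--             in_string = True
--             chars.append(char)
--             i += 1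
--             continue
--
--         if raw.startswith("{}", i) or raw.startswith("[]", i):
--             previous = _previous_significant_char(chars)
--             following = _next_significant_char(raw, i + 2)
--             if previous not in (":", ",") and following in (None, "}", "]"):
--                 i += 2
--                 continue
--
--         chars.append(char)
--         i += 1
--
--     return "".join(chars)
--
-- def _previous_significant_char(chars: list[str]) -> str | None:
--     for char in reversed(chars):
--         if not char.isspace():
--             return char
--     return None
--
-- def _next_significant_char(raw: str, start: int) -> str | None:
--     for char in raw[start:]:
--         if not char.isspace():
--             return char
--     return None
-- ===== SOURCE B (Python) =====
-- def _strip_stray_empty_containers(raw: str) -> str: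
--     n = len(raw)
--     # nxt[i] = first non-space character of raw[i:], or None (suffix array, built once)
--     nxt = [None] * (n + 1)
--     for i in range(n - 1, -1, -1):
--         nxt[i] = nxt[i + 1] if raw[i].isspace() else raw[i]
--     out = []
--     last_sig = None  # last non-space character appended to out, maintained incrementally
--     in_string = False
--     escaped = False
--     i = 0
--     while i < n:
--         c = raw[i]
--         if in_string:
--             out.append(c)
--             if not c.isspace():
--                 last_sig = c
--             if escaped:
--                 escaped = False
--             elif c == "\\":
--                 escaped = True
--             elif c == '"':
--                 in_string = False
--             i += 1
--             continue
--         if c == '"':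
--             out.append(c)
--             last_sig = c
--             in_string = True
--             i += 1
--             continue
--         if (c == "{" and i + 1 < n and raw[i + 1] == "}") or (
--             c == "[" and i + 1 < n and raw[i + 1] == "]"
--         ):
--             if last_sig not in (":", ",") and nxt[i + 2] in (None, "}", "]"):
--                 i += 2
--                 continue
--         out.append(c)
--         if not c.isspace():
--             last_sig = c
--         i += 1
--     return "".join(out)
-- ===== Notes on version B (the rewrite author's own statement) =====
-- stated objective: faster
-- what changed: Replaced A's per-candidate backward rescan of the output and forward rescan (with slicing) of the input by an incrementally maintained last-significant character and a next-non-space suffix array built once, making one linear pass.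
import Mathlib
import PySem

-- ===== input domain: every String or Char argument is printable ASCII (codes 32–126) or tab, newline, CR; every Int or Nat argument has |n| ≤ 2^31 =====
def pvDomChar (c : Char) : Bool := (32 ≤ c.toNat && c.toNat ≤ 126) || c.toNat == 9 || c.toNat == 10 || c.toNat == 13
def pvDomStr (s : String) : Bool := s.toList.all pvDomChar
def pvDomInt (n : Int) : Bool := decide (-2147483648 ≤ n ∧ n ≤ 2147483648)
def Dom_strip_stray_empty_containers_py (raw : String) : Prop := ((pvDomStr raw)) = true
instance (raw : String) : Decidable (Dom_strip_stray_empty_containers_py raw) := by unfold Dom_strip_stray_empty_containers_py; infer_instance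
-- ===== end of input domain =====

-- B replaces A's backward rescans of the output and forward rescans of the input (done at every
-- "{}"/"[]" candidate) by an incrementally maintained last-significant character and a
-- next-non-space suffix array built once; one left-to-right pass, same output.

-- ===== PORT A =====
-- not a whitespace character (Python's str.isspace, via PySem)
def sigChar (c : Char) : Bool := !(PySem.Chars.isspace c)

-- _previous_significant_char(chars): scan the collected output backwards
def prevSig (chars : List Char) : Option Char := List.find? sigChar chars.reverse

-- _next_significant_char(raw, start): scan the rest of the input forwards
def nextSig (rest : List Char) : Option Char := List.find? sigChar rest

def loopA : List Char → List Char → Bool → Bool → List Char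
  | [], chars, _, _ => chars
  | c :: rest, chars, inStr, esc =>
    if inStr then
      if esc then loopA rest (chars ++ [c]) true false
      else if c == '\\' then loopA rest (chars ++ [c]) true true
      else if c == '"' then loopA rest (chars ++ [c]) false false
      else loopA rest (chars ++ [c]) true false
    else if c == '"' then loopA rest (chars ++ [c]) true false
    else if ((c == '{' && rest.head? == some '}') || (c == '[' && rest.head? == some ']'))
        && !(prevSig chars == some ':' || prevSig chars == some ',')
        && (match nextSig (rest.drop 1) with
            | none => true
            | some d => d == '}' || d == ']') then
      loopA (rest.drop 1) chars false false
    else loopA rest (chars ++ [c]) false false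
  termination_by s _ _ _ => s.length
  decreasing_by all_goals simp; all_goals omega

def strip_stray_empty_containers_py (raw : String) : String :=
  String.mk (loopA raw.toList [] false false)

-- ===== PORT B =====
-- suffix array: (buildNxt s)[i] = first non-space char of s.drop i, built once back to front
def buildNxt : List Char → List (Option Char)
  | [] => [none]
  | c :: rest =>
    (if PySem.Chars.isspace c then (buildNxt rest).headD none else some c) :: buildNxt rest

-- single pass; out is kept reversed, lastSig is the last non-space char appended to out
def loopB : List Char → List (Option Char) → List Char → Option Char → Bool → Bool → List Char
  | [], _, out, _, _, _ => out
  | c :: rest, nxts, out, lastSig, inStr, esc =>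
    if inStr then
      if esc then
        loopB rest (nxts.drop 1) (c :: out)
          (if PySem.Chars.isspace c then lastSig else some c) true false
      else if c == '\\' then
        loopB rest (nxts.drop 1) (c :: out)
          (if PySem.Chars.isspace c then lastSig else some c) true true
      else if c == '"' then
        loopB rest (nxts.drop 1) (c :: out)
          (if PySem.Chars.isspace c then lastSig else some c) false false
      else
        loopB rest (nxts.drop 1) (c :: out)
          (if PySem.Chars.isspace c then lastSig else some c) true false
    else if c == '"' then loopB rest (nxts.drop 1) (c :: out) (some c) true false
    else if ((c == '{' && rest.head? == some '}') || (c == '[' && rest.head? == some ']'))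
        && !(lastSig == some ':' || lastSig == some ',')
        && (match (nxts.drop 2).headD none with
            | none => true
            | some d => d == '}' || d == ']') then
      loopB (rest.drop 1) (nxts.drop 2) out lastSig false false
    else
      loopB rest (nxts.drop 1) (c :: out)
        (if PySem.Chars.isspace c then lastSig else some c) false false
  termination_by s _ _ _ _ _ => s.length
  decreasing_by all_goals simp; all_goals omega

def strip_stray_empty_containers_py_alt (raw : String) : String :=
  String.mk (loopB raw.toList (buildNxt raw.toList) [] none false false).reverse

-- ===== PRECONDITION & SPEC =====
def Spec_strip_stray_empty_containers_py (raw : String) (out : String) : Prop := out = strip_stray_empty_containers_py_alt raw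
instance (raw : String) (out : String) : Decidable (Spec_strip_stray_empty_containers_py raw out) := by unfold Spec_strip_stray_empty_containers_py; infer_instance

-- ===== CLAIM (what is proved, stated in full; the proofs are below) =====
def Claim_equal_strip_stray_empty_containers_py : Prop := ∀ (raw : String), Dom_strip_stray_empty_containers_py raw → Spec_strip_stray_empty_containers_py raw (strip_stray_empty_containers_py raw)

-- ===== LEMMAS AND PROOFS =====

-- the suffix array's head is the next significant character
lemma buildNxt_headD (s : List Char) : (buildNxt s).headD none = nextSig s := by
  induction s with
  | nil => simp [buildNxt, nextSig]
  | cons c rest ih =>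
    rw [nextSig] at ih
    simp only [buildNxt, nextSig, List.find?_cons, List.headD_cons]
    by_cases h : PySem.Chars.isspace c = true <;> simp [h, sigChar, ← ih, List.headD_eq_head?_getD]

lemma buildNxt_drop2 (c : Char) (rest : List Char) :
    ((buildNxt (c :: rest)).drop 2).headD none = nextSig (rest.drop 1) := by
  cases rest with
  | nil => simp [buildNxt, nextSig]
  | cons d rest' =>
    have := buildNxt_headD rest'
    simpa [buildNxt] using this

lemma prevSig_reverse (out : List Char) : prevSig out.reverse = List.find? sigChar out := by
  simp [prevSig]

lemma find?_cons_sig (c : Char) (out : List Char) :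
    List.find? sigChar (c :: out) =
      (if PySem.Chars.isspace c then List.find? sigChar out else some c) := by
  by_cases h : PySem.Chars.isspace c = true <;> simp [List.find?_cons, sigChar, h]

lemma loop_eq : ∀ (n : Nat) (s : List Char), s.length ≤ n →
    ∀ (out : List Char) (inStr esc : Bool),
    loopA s out.reverse inStr esc =
      (loopB s (buildNxt s) out (List.find? sigChar out) inStr esc).reverse := by
  intro n
  induction n with
  | zero =>
    intro s hs out inStr esc
    have : s = [] := List.length_eq_zero_iff.mp (Nat.le_zero.mp hs)
    subst this; simp [loopA, loopB]
  | succ n ih =>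
    intro s hs out inStr esc
    cases s with
    | nil => simp [loopA, loopB]
    | cons c rest =>
      have hr : rest.length ≤ n := by simpa using hs
      have hr1 : (rest.drop 1).length ≤ n := by
        simp only [List.length_drop]; omega
      have hrev : (c :: out).reverse = out.reverse ++ [c] := by simp
      rw [loopA, loopB]
      by_cases hin : inStr
      · simp only [hin, if_true]
        by_cases hesc : esc
        · simp only [hesc, if_true]
          rw [show buildNxt (c :: rest) = _ :: buildNxt rest from rfl]
          simp only [List.drop_one, List.tail_cons]
          rw [← find?_cons_sig, ← hrev]
          exact ih rest hr (c :: out) _ _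
        · simp only [hesc, if_false]
          rw [show buildNxt (c :: rest) = _ :: buildNxt rest from rfl]
          by_cases h1 : c == '\\'
          · simp only [h1, if_true]
            simp only [List.drop_one, List.tail_cons]
            rw [← find?_cons_sig, ← hrev]
            exact ih rest hr (c :: out) _ _
          · simp only [h1, if_false]
            by_cases h2 : c == '"'
            · simp only [h2, if_true]
              simp only [List.drop_one, List.tail_cons]
              rw [← find?_cons_sig, ← hrev]
              exact ih rest hr (c :: out) _ _
            · simp only [h2, if_false]
              simp only [List.drop_one, List.tail_cons]
              rw [← find?_cons_sig, ← hrev]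
              exact ih rest hr (c :: out) _ _
      · simp only [hin, if_false]
        by_cases h2 : c == '"'
        · simp only [h2, if_true]
          rw [show buildNxt (c :: rest) = _ :: buildNxt rest from rfl]
          have : List.find? sigChar (c :: out) = some c := by
            have : c = '"' := by exact_mod_cast eq_of_beq h2
            subst this; simp [find?_cons_sig, PySem.Chars.isspace]
          simp only [List.drop_one, List.tail_cons]
          rw [show (some c) = List.find? sigChar (c :: out) from this.symm, ← hrev]
          exact ih rest hr (c :: out) _ _
        · simp only [h2, if_false]
          rw [prevSig_reverse, buildNxt_drop2]
          by_cases hc : (((c == '{' && rest.head? == some '}') || (c == '[' && rest.head? == some ']'))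
              && !(List.find? sigChar out == some ':' || List.find? sigChar out == some ',')
              && (match nextSig (rest.drop 1) with
                  | none => true
                  | some d => d == '}' || d == ']')) = true
          · simp only [hc, if_true]
            -- rest is nonempty in this branch, so the suffix array drops in step
            cases rest with
            | nil => simp at hc
            | cons d rest' =>
              have hd2 : (buildNxt (c :: d :: rest')).drop 2 = buildNxt rest' := by
                simp [buildNxt]
              rw [hd2]
              exact ih rest' (by simp at hr1; simpa using hr1) out false false
          · simp only [hc, if_false]
            rw [show buildNxt (c :: rest) = _ :: buildNxt rest from rfl]
            simp only [List.drop_one, List.tail_cons]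
            rw [← find?_cons_sig, ← hrev]
            exact ih rest hr (c :: out) _ _

-- ===== VERDICT (by name: the statement is the Claim_ definition above) =====
theorem strip_stray_empty_containers_py_spec : Claim_equal_strip_stray_empty_containers_py := by
  intro raw _
  unfold Spec_strip_stray_empty_containers_py strip_stray_empty_containers_py
    strip_stray_empty_containers_py_alt
  have h := loop_eq raw.toList.length raw.toList le_rfl [] false false
  simp only [List.reverse_nil, List.find?_nil] at h
  rw [h]
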